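-- pv_equiv track=rewrite | github.com/wojmichaluk/ASD-2022-2023 | cwiczenia/14/1.py | tank
-- ===== SOURCE A (Python) =====
-- def tank(stations,L): #1a)
--     n=len(stations)
--     far=[0]
--     tanks=1
--     pos=0
--     while pos<n-L:
--         pos+=L
--         while not stations[pos]:
--             pos-=1
--         far.append(pos)
--         tanks+=1
--     return tanks,far
-- ===== SOURCE B (Python) =====
-- def tank(stations, L):
--     # prev[i] = index of the last truthy station at or before i (None if none yet)
--     prev = []
--     last = None
--     for i, s in enumerate(stations):
--         if s:
--             last = i
--         prev.append(last)
--     limit = len(stations) - L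
--     far = [0]
--     while far[-1] < limit:
--         far.append(prev[far[-1] + L])
--     return len(far), far
-- ===== Notes on version B (the rewrite author's own statement) =====
-- stated objective: alternative
-- what changed: Replaces the inner backward scan over stations by a prev[] table (last truthy index up to each position) built in one forward pass, and drives the greedy loop off the stops list itself (far[-1]), with the tank count recovered as len(far) instead of a running counter.
import Mathlib
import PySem

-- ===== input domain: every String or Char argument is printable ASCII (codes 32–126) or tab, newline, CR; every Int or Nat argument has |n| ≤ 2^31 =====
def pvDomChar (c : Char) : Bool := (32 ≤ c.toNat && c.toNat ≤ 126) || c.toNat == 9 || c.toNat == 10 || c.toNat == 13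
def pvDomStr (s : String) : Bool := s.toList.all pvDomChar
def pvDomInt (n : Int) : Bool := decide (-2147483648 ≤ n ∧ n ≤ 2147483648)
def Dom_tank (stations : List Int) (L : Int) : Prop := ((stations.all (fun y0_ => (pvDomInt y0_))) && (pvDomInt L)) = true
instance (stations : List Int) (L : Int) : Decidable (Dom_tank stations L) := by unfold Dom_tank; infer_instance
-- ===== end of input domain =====

-- B replaces A's inner backward scan over stations by a prev[] table (last truthy index up to
-- each position) built in one forward pass, and drives the greedy loop off the stops list
-- itself (far[-1]), recovering the tank count as len(far) (objective: alternative algorithm).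
-- The loops of A and B need not terminate in Python; both ports run on fuel stations.length + 1,
-- which suffices on every input admitted by Pre_tank (pos strictly increases each iteration).

-- ===== PORT A =====
-- inner loop: while not stations[pos]: pos -= 1   (pyGet? none = IndexError → none)
def innerA (stations : List Int) : Int → Nat → Option Int
  | _, 0 => none
  | pos, fuel+1 =>
    match PySem.List.pyGet? stations pos with
    | none => none
    | some v => if v ≠ 0 then some pos else innerA stations (pos - 1) fuel

-- outer loop: while pos < n - L: pos += L; <inner>; far.append(pos); tanks += 1
def outerA (stations : List Int) (L n : Int) : Int → Int → List Int → Nat → Option (Int × List Int)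
  | _, _, _, 0 => none
  | pos, tanks, far, fuel+1 =>
    if pos < n - L then
      match innerA stations (pos + L) ((pos + L).toNat + stations.length + 2) with
      | none => none
      | some p => outerA stations L n p (tanks + 1) (far ++ [p]) fuel
    else some (tanks, far)

def tank (stations : List Int) (L : Int) : Int × List Int :=
  (outerA stations L (stations.length : Int) 0 1 [0] (stations.length + 1)).getD (0, [])

-- ===== PORT B =====
-- forward pass building prev: for i, s in enumerate(stations): if s: last = i; prev.append(last)
def prevGo (i : Int) (last : Option Int) : List Int → List (Option Int)
  | [] => []
  | s :: rest =>
    let last' := if s ≠ 0 then some i else last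
    last' :: prevGo (i + 1) last' rest

-- greedy loop over the stops list itself: while far[-1] < limit: far.append(prev[far[-1] + L])
-- (far[-1] on [], a None entry or an out-of-range prev index raises in Python → none)
def goB (prev : List (Option Int)) (L limit : Int) : List Int → Nat → Option (List Int)
  | _, 0 => none
  | far, fuel+1 =>
    match PySem.List.pyGet? far (-1) with
    | none => none
    | some p =>
      if p < limit then
        match PySem.List.pyGet? prev (p + L) with
        | some (some q) => goB prev L limit (far ++ [q]) fuel
        | _ => none
      else some far

-- return len(far), far
def tank_alt (stations : List Int) (L : Int) : Int × List Int :=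
  match goB (prevGo 0 none stations) L ((stations.length : Int) - L) [0] (stations.length + 1) with
  | some far => ((far.length : Int), far)
  | none => (0, [])

-- ===== PRECONDITION & SPEC =====
-- Pre_tank admits exactly the inputs on which Python A returns: either the loop never runs
-- (len(stations) ≤ L), or L ≥ 1 and every window of L consecutive entries starting at an index
-- in [1, n-L] contains a truthy station; otherwise A loops forever or raises IndexError via
-- negative-index wraparound (it never returns a value outside Pre_tank).
def Pre_tank (stations : List Int) (L : Int) : Prop :=
  (stations.length : Int) ≤ L ∨
  (1 ≤ L ∧ ∀ i ∈ List.range stations.length, 1 ≤ i → (i : Int) ≤ (stations.length : Int) - L →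
    ∃ j ∈ List.range stations.length, i ≤ j ∧ (j : Int) < (i : Int) + L ∧ stations.getD j 0 ≠ 0)
instance (stations : List Int) (L : Int) : Decidable (Pre_tank stations L) := by
  unfold Pre_tank; infer_instance

def pvWitness_tank : List Int × Int := ([1, 1], 1)

def Spec_tank (stations : List Int) (L : Int) (out : Int × List Int) : Prop := out = tank_alt stations L
instance (stations : List Int) (L : Int) (out : Int × List Int) : Decidable (Spec_tank stations L out) := by unfold Spec_tank; infer_instance

-- ===== CLAIM (what is proved, stated in full; the proofs are below) =====
def Claim_equal_tank : Prop := ∀ (stations : List Int) (L : Int), Dom_tank stations L → Pre_tank stations L → Spec_tank stations L (tank stations L)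

-- ===== LEMMAS AND PROOFS =====

-- last truthy index ≤ k, the common specification of A's inner scan and B's prev[] entries
def lastT (stations : List Int) : Nat → Option Int
  | 0 => if stations.getD 0 0 ≠ 0 then some 0 else none
  | k+1 => if stations.getD (k+1) 0 ≠ 0 then some ((k+1 : Nat) : Int) else lastT stations k

lemma lastT_nonneg (stations : List Int) (k : Nat) (j : Int)
    (h : lastT stations k = some j) : 0 ≤ j := by
  induction k with
  | zero => unfold lastT at h; split at h <;> simp_all
  | succ k ih =>
    unfold lastT at h
    split at h
    · simp at h; omega
    · exact ih h

lemma lastT_exists (stations : List Int) (m k : Nat) (hmk : m ≤ k)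
    (hm : stations.getD m 0 ≠ 0) : ∃ j, lastT stations k = some j ∧ (m : Int) ≤ j := by
  induction k with
  | zero =>
    have hm0 : stations.getD 0 0 ≠ 0 := by
      have hme : m = 0 := by omega
      rwa [hme] at hm
    refine ⟨0, ?_, by omega⟩
    unfold lastT; rw [if_pos hm0]
  | succ k ih =>
    by_cases h : stations.getD (k+1) 0 ≠ 0
    · refine ⟨((k+1 : Nat) : Int), ?_, by exact_mod_cast hmk⟩
      unfold lastT; rw [if_pos h]
    · have hmk' : m ≤ k := by
        by_contra hc
        have hm1 : m = k + 1 := by omega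
        rw [hm1] at hm
        exact h hm
      obtain ⟨j, hj, hmj⟩ := ih hmk'
      refine ⟨j, ?_, hmj⟩
      unfold lastT; rw [if_neg h]; exact hj

lemma getD_some (stations : List Int) (k : Nat) (hk : k < stations.length) :
    stations[k]? = some (stations.getD k 0) := by
  rw [List.getElem?_eq_getElem hk, List.getD_eq_getElem?_getD, List.getElem?_eq_getElem hk]
  rfl

lemma innerA_eq (stations : List Int) (k : Nat) :
    ∀ (fuel : Nat), k < stations.length → k + 1 ≤ fuel → (lastT stations k).isSome →
    innerA stations (k : Int) fuel = lastT stations k := by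
  induction k with
  | zero =>
    intro fuel hk hf hs
    obtain ⟨f, rfl⟩ : ∃ f, fuel = f + 1 := ⟨fuel - 1, by omega⟩
    unfold innerA
    rw [PySem.List.pyGet?_natCast, getD_some stations 0 hk]
    show (if stations.getD 0 0 ≠ 0 then some ((0 : Nat) : Int)
          else innerA stations (((0 : Nat) : Int) - 1) f) = lastT stations 0
    by_cases h : stations.getD 0 0 ≠ 0
    · rw [if_pos h]; unfold lastT; rw [if_pos h]; norm_num
    · exfalso; unfold lastT at hs; rw [if_neg h] at hs; simp at hs
  | succ k ih =>
    intro fuel hk hf hs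
    obtain ⟨f, rfl⟩ : ∃ f, fuel = f + 1 := ⟨fuel - 1, by omega⟩
    unfold innerA
    rw [PySem.List.pyGet?_natCast, getD_some stations (k+1) hk]
    show (if stations.getD (k+1) 0 ≠ 0 then some (((k+1 : Nat)) : Int)
          else innerA stations ((((k+1) : Nat) : Int) - 1) f) = lastT stations (k+1)
    by_cases h : stations.getD (k+1) 0 ≠ 0
    · rw [if_pos h]; unfold lastT; rw [if_pos h]
    · have hs' : (lastT stations k).isSome := by
        unfold lastT at hs; rwa [if_neg h] at hs
      have hcast : ((k+1 : Nat) : Int) - 1 = (k : Int) := by push_cast; ring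
      rw [if_neg h, hcast]
      unfold lastT; rw [if_neg h]
      exact ih f (by omega) (by omega) hs'

-- element k of B's prev table, expressed by structural recursion on the list
def Fspec : List Int → Int → Option Int → Nat → Option Int
  | [], _, last, _ => last
  | s :: rest, i, last, k =>
    let last' := if s ≠ 0 then some i else last
    match k with
    | 0 => last'
    | k+1 => Fspec rest (i + 1) last' k

lemma prevGo_get (xs : List Int) : ∀ (i : Int) (last : Option Int) (k : Nat), k < xs.length →
    (prevGo i last xs)[k]? = some (Fspec xs i last k) := by
  induction xs with
  | nil => intro i last k hk; simp at hk
  | cons s rest ih =>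
    intro i last k hk
    cases k with
    | zero => simp [prevGo, Fspec]
    | succ k => simpa [prevGo, Fspec] using ih (i + 1) _ k (by simpa using Nat.lt_of_succ_lt_succ hk)

lemma Fspec_step (xs : List Int) : ∀ (i : Int) (last : Option Int) (k : Nat), k + 1 < xs.length →
    Fspec xs i last (k + 1) =
      if xs.getD (k+1) 0 ≠ 0 then some (i + (k : Int) + 1) else Fspec xs i last k := by
  induction xs with
  | nil => intro i last k hk; simp at hk
  | cons s rest ih =>
    intro i last k hk
    cases k with
    | zero =>
      cases rest with
      | nil => simp at hk
      | cons r rrest =>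
        show (if r ≠ 0 then some (i + 1) else (if s ≠ 0 then some i else last)) =
          if (s :: r :: rrest).getD 1 0 ≠ 0 then some (i + ((0 : Nat) : Int) + 1)
          else (if s ≠ 0 then some i else last)
        have hg : (s :: r :: rrest).getD 1 0 = r := by simp [List.getD]
        rw [hg]
        by_cases h : r ≠ 0
        · rw [if_pos h, if_pos h]; norm_num
        · rw [if_neg h, if_neg h]
    | succ k =>
      have h1 : k + 1 < rest.length := by simpa using hk
      have hrec := ih (i + 1) (if s ≠ 0 then some i else last) k h1
      show Fspec rest (i + 1) (if s ≠ 0 then some i else last) (k + 1) =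
        if (s :: rest).getD (k + 1 + 1) 0 ≠ 0 then some (i + ((k + 1 : Nat) : Int) + 1)
        else Fspec rest (i + 1) (if s ≠ 0 then some i else last) k
      have hg : (s :: rest).getD (k + 1 + 1) 0 = rest.getD (k + 1) 0 := by simp [List.getD]
      rw [hrec, hg]
      by_cases h : rest.getD (k + 1) 0 ≠ 0
      · rw [if_pos h, if_pos h]; congr 1; push_cast; ring
      · rw [if_neg h, if_neg h]

lemma Fspec_eq_lastT (stations : List Int) (k : Nat) (hk : k < stations.length) :
    Fspec stations 0 none k = lastT stations k := by
  induction k with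
  | zero =>
    cases stations with
    | nil => simp at hk
    | cons s rest =>
      unfold lastT
      by_cases h : s ≠ 0 <;> simp [Fspec, List.getD, h]
  | succ k ih =>
    rw [Fspec_step stations 0 none k hk]
    unfold lastT
    split
    · congr 1; push_cast; ring
    · exact ih (by omega)

lemma prev_lookup (stations : List Int) (k : Nat) (hk : k < stations.length) :
    PySem.List.pyGet? (prevGo 0 none stations) (k : Int) = some (lastT stations k) := by
  rw [PySem.List.pyGet?_natCast, prevGo_get stations 0 none k hk, Fspec_eq_lastT stations k hk]

-- A's counter/position loop and B's list-driven loop agree step for step: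
-- taking far for B's state with far.getLast? = some pos and tanks = far.length
lemma outer_eq (stations : List Int) (L : Int) (hL : 1 ≤ L)
    (hw : ∀ i < stations.length, 1 ≤ i → (i : Int) ≤ (stations.length : Int) - L →
      ∃ j < stations.length, i ≤ j ∧ (j : Int) < (i : Int) + L ∧ stations.getD j 0 ≠ 0) :
    ∀ (fuel : Nat) (far : List Int) (pos : Int), far.getLast? = some pos → 0 ≤ pos →
      outerA stations L (stations.length : Int) pos (far.length : Int) far fuel =
      (goB (prevGo 0 none stations) L ((stations.length : Int) - L) far fuel).map
        (fun l => ((l.length : Int), l)) := by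
  intro fuel
  induction fuel with
  | zero => intro far pos hlast hpos; rfl
  | succ fuel ih =>
    intro far pos hlast hpos
    unfold outerA goB
    rw [PySem.List.pyGet?_neg_one, hlast]
    by_cases hc : pos < (stations.length : Int) - L
    · simp only [if_pos hc]
      obtain ⟨p, rfl⟩ : ∃ p : Nat, pos = (p : Int) := ⟨pos.toNat, by omega⟩
      -- the landing index pos + L as a natural number
      obtain ⟨k, hk⟩ : ∃ k : Nat, (p : Int) + L = (k : Int) := ⟨((p : Int) + L).toNat, by omega⟩
      have hkn : k < stations.length := by omega
      -- window starting at p+1 contains a truthy station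
      obtain ⟨j, hjn, hj1, hj2, hj3⟩ := hw (p + 1) (by omega) (by omega) (by push_cast; omega)
      have hjk : j ≤ k := by omega
      obtain ⟨r, hr, hmr⟩ := lastT_exists stations j k hjk hj3
      have hrn : 0 ≤ r := lastT_nonneg stations k r hr
      have hinner : innerA stations ((p : Int) + L) (((p : Int) + L).toNat + stations.length + 2)
          = some r := by
        rw [hk]
        rw [innerA_eq stations k _ hkn (by omega) (by simp [hr])]
        exact hr
      have hprev : PySem.List.pyGet? (prevGo 0 none stations) ((p : Int) + L) = some (some r) := by
        rw [hk, prev_lookup stations k hkn, hr]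
      rw [hinner, hprev]
      have hlen : (far.length : Int) + 1 = ((far ++ [r]).length : Int) := by
        simp
      rw [hlen]
      exact ih (far ++ [r]) r (by simp) hrn
    · simp [if_neg hc]

-- ===== VERDICT (by name: the statement is the Claim_ definition above) =====
theorem tank_spec : Claim_equal_tank := by
  intro stations L _hdom hpre
  unfold Spec_tank tank tank_alt
  rcases hpre with hle | ⟨hL, hw⟩
  · -- len(stations) ≤ L: neither loop runs
    have h0 : ¬ ((0 : Int) < (stations.length : Int) - L) := by omega
    unfold outerA goB
    rw [PySem.List.pyGet?_neg_one]
    simp only [List.getLast?_singleton]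
    rw [if_neg h0, if_neg h0]
    rfl
  · have hw' : ∀ i < stations.length, 1 ≤ i → (i : Int) ≤ (stations.length : Int) - L →
        ∃ j < stations.length, i ≤ j ∧ (j : Int) < (i : Int) + L ∧ stations.getD j 0 ≠ 0 := by
      intro i hi h1 h2
      obtain ⟨j, hj, hj1, hj2, hj3⟩ := hw i (List.mem_range.mpr hi) h1 h2
      exact ⟨j, List.mem_range.mp hj, hj1, hj2, hj3⟩
    have h1 : ((1 : Int)) = (([(0 : Int)].length : Nat) : Int) := by simp
    rw [h1, outer_eq stations L hL hw' (stations.length + 1) [0] 0 (by simp) le_rfl]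
    cases goB (prevGo 0 none stations) L ((stations.length : Int) - L) [0] (stations.length + 1) <;> rfl
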